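-- pv_equiv track=rewrite | github.com/nicyoong/adventofcode2021 | 03/power.py | calculate_power_consumption
-- ===== SOURCE A (Python) =====
-- def calculate_power_consumption(report):
--     # Number of bits in each binary number
--     bit_length = len(report[0])
--
--     # Initialize counters for 1s and 0s in each bit position
--     ones_count = [0] * bit_length
--     total_count = len(report)
--
--     # Count the number of 1s in each bit position across all binary numbers
--     for binary_number in report:
--         for i, bit in enumerate(binary_number):
--             if bit == '1':
--                 ones_count[i] += 1
--
--     # Calculate the gamma rate (most common bit in each position)
--     gamma_rate_binary = ''.join('1' if ones_count[i] > total_count / 2 else '0' for i in range(bit_length))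
--
--     # Calculate the epsilon rate (least common bit in each position)
--     epsilon_rate_binary = ''.join('0' if ones_count[i] > total_count / 2 else '1' for i in range(bit_length))
--
--     # Convert binary to decimal
--     gamma_rate = int(gamma_rate_binary, 2)
--     epsilon_rate = int(epsilon_rate_binary, 2)
--
--     # Calculate power consumption (gamma_rate * epsilon_rate)
--     power_consumption = gamma_rate * epsilon_rate
--     return power_consumption
-- ===== SOURCE B (Python) =====
-- def calculate_power_consumption(report):
--     bit_length = len(report[0])
--     total = len(report)
--     gamma = 0
--     for i in range(bit_length):
--         ones = sum(1 for row in report if i < len(row) and row[i] == '1')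
--         gamma = gamma * 2 + (1 if 2 * ones > total else 0)
--     epsilon = (1 << bit_length) - 1 - gamma
--     return gamma * epsilon
-- ===== Notes on version B (the rewrite author's own statement) =====
-- stated objective: simpler
-- what changed: Replaces the row-major nested counting loop plus two binary-string builds and int(_,2) conversions by a column-major count per bit position, an arithmetic accumulation of gamma, and epsilon derived as gamma's complement within bit_length ((1<<bit_length)-1-gamma) instead of building a second string.
import Mathlib
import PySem

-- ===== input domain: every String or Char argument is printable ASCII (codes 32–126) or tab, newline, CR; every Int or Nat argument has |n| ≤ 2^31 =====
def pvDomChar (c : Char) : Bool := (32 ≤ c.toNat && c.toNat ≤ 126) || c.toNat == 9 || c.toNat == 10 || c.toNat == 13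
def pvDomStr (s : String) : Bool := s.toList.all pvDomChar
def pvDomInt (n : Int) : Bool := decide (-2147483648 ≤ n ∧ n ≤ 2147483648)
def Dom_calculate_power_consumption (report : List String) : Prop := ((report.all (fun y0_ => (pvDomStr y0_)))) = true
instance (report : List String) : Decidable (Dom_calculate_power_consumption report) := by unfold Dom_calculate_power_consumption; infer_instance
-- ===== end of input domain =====

-- B counts ones column-major, builds gamma arithmetically and derives epsilon as
-- gamma's complement within bit_length, instead of A's row-major nested loop,
-- two binary strings and int(_,2) conversions; same cost, simpler.


-- ===== PORT A =====
-- ones_count[i] += 1 : in-range increment (out-of-range, where Python raises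
-- IndexError, is excluded by Pre_; there pvIncAt is a no-op).
def pvIncAt : List Int → Nat → List Int
  | [], _ => []
  | x :: xs, 0 => (x + 1) :: xs
  | x :: xs, Nat.succ n => x :: pvIncAt xs n

-- Python's enumerate(binary_number), transliterated by hand (exact).
def pvEnum : Nat → List Char → List (Nat × Char)
  | _, [] => []
  | k, c :: cs => (k, c) :: pvEnum (k + 1) cs

def pvRowStep (counts : List Int) (p : Nat × Char) : List Int :=
  if p.2 = '1' then pvIncAt counts p.1 else counts

-- int(s, 2) on a string of '0'/'1' chars: left-to-right acc*2 + digit (exact).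
def pvBinToInt (cs : List Char) : Int :=
  cs.foldl (fun a c => a * 2 + (if c = '1' then (1 : Int) else 0)) 0

-- 'ones_count[i] > total_count / 2' with ints is exactly '2*ones > total'.
def calculate_power_consumption (report : List String) : Int :=
  match report with
  | [] => 0  -- Python raises IndexError on report[0]; excluded by Pre_
  | r0 :: _ =>
    let bit_length := r0.toList.length
    let total : Int := report.length
    let ones := report.foldl
      (fun cnts row => (pvEnum 0 row.toList).foldl pvRowStep cnts)
      (List.replicate bit_length (0 : Int))
    let gamma_rate_binary := (List.range bit_length).map
      (fun i => if 2 * ones.getD i 0 > total then '1' else '0')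
    let epsilon_rate_binary := (List.range bit_length).map
      (fun i => if 2 * ones.getD i 0 > total then '0' else '1')
    pvBinToInt gamma_rate_binary * pvBinToInt epsilon_rate_binary

-- ===== PORT B =====
-- sum(1 for row in report if i < len(row) and row[i] == '1')
def pvColOnes (report : List String) (i : Nat) : Int :=
  report.foldl (fun n row => n + (if row.toList[i]? = some '1' then (1 : Int) else 0)) 0

-- '(1 << bit_length)' ported as 2 ^ bit_length (exact for a Nat shift count).
def calculate_power_consumption_alt (report : List String) : Int :=
  match report with
  | [] => 0  -- Python raises IndexError on report[0]; excluded by Pre_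
  | r0 :: _ =>
    let bit_length := r0.toList.length
    let total : Int := report.length
    let gamma := (List.range bit_length).foldl
      (fun g i => g * 2 + (if 2 * pvColOnes report i > total then (1 : Int) else 0)) 0
    let epsilon := 2 ^ bit_length - 1 - gamma
    gamma * epsilon

-- ===== PRECONDITION & SPEC =====
-- Pre_ excludes exactly the inputs where Python A raises: the empty report
-- (IndexError), an empty first row (ValueError from int('', 2)), and reports
-- where some row has a '1' at an index ≥ len(report[0]) (IndexError).
def Pre_calculate_power_consumption (report : List String) : Prop :=
  report ≠ [] ∧ (report.headD "").toList ≠ [] ∧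
    ∀ s ∈ report, '1' ∉ s.toList.drop ((report.headD "").toList.length)
instance (report : List String) : Decidable (Pre_calculate_power_consumption report) := by
  unfold Pre_calculate_power_consumption; infer_instance

def pvWitness_calculate_power_consumption : List String := ["10", "01", "11"]

def Spec_calculate_power_consumption (report : List String) (out : Int) : Prop := out = calculate_power_consumption_alt report
instance (report : List String) (out : Int) : Decidable (Spec_calculate_power_consumption report out) := by unfold Spec_calculate_power_consumption; infer_instance

-- ===== CLAIM (what is proved, stated in full; the proofs are below) =====
def Claim_equal_calculate_power_consumption : Prop := ∀ (report : List String), Dom_calculate_power_consumption report → Pre_calculate_power_consumption report → Spec_calculate_power_consumption report (calculate_power_consumption report)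

-- ===== LEMMAS AND PROOFS =====

theorem pvIncAt_get? (l : List Int) (i j : Nat) :
    (pvIncAt l i)[j]? = if i = j then (l[j]?).map (· + 1) else l[j]? := by
  induction l generalizing i j with
  | nil => simp [pvIncAt]
  | cons x xs ih =>
    cases i with
    | zero => cases j <;> simp [pvIncAt]
    | succ n =>
      cases j with
      | zero => simp [pvIncAt]
      | succ m => simpa [pvIncAt] using ih n m

theorem pvFoldPairs_get? (ps : List (Nat × Char)) (counts : List Int) (j : Nat) :
    (ps.foldl pvRowStep counts)[j]? =
      (counts[j]?).map (· + (ps.countP (fun p => p.1 == j && p.2 == '1') : Int)) := by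
  induction ps generalizing counts with
  | nil => cases h : counts[j]? <;> simp [h]
  | cons p ps ih =>
    obtain ⟨i, c⟩ := p
    rw [List.foldl_cons, ih, List.countP_cons]
    by_cases hc : c = '1'
    · by_cases hij : i = j
      · subst hij hc
        simp [pvRowStep, pvIncAt_get?]
        cases counts[i]? <;> simp
        ring
      · simp [pvRowStep, hc, hij, pvIncAt_get?]
    · simp [pvRowStep, hc]

theorem pvEnum_countP (cs : List Char) (k j : Nat) :
    ((pvEnum k cs).countP (fun p => p.1 == j && p.2 == '1') : Int) =
      if (k ≤ j ∧ cs[j - k]? = some '1') then 1 else 0 := by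
  induction cs generalizing k with
  | nil => simp [pvEnum]
  | cons c cs ih =>
    rw [pvEnum, List.countP_cons]
    push_cast
    rw [ih (k + 1)]
    rcases lt_trichotomy k j with h | h | h
    · have h1 : k + 1 ≤ j := h
      have h2 : ¬ (k == j) = true := by simp; omega
      have h3 : (c :: cs)[j - k]? = cs[j - (k + 1)]? := by
        have : j - k = (j - (k + 1)) + 1 := by omega
        rw [this]; simp
      simp [h1, h2, h3, show k ≤ j by omega]
    · subst h
      by_cases hc : c = '1' <;>
        simp [hc, show ¬ k + 1 ≤ k by omega]
    · simp [show ¬ k ≤ j by omega, show ¬ k + 1 ≤ j by omega, show ¬ (k == j) = true by simp; omega]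

theorem pvColOnes_sum (rows : List String) (j : Nat) :
    pvColOnes rows j =
      (rows.map (fun row => if row.toList[j]? = some '1' then (1 : Int) else 0)).sum := by
  unfold pvColOnes
  rw [PySem.List.foldl_add]
  simp

theorem pvFoldRows_get? (rows : List String) (counts : List Int) (j : Nat) :
    ((rows.foldl (fun cnts row => (pvEnum 0 row.toList).foldl pvRowStep cnts) counts)[j]?) =
      (counts[j]?).map (· + pvColOnes rows j) := by
  induction rows generalizing counts with
  | nil => cases h : counts[j]? <;> simp [h, pvColOnes]
  | cons r rows ih =>
    rw [List.foldl_cons, ih, pvFoldPairs_get?]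
    have hsum : pvColOnes (r :: rows) j =
        (if r.toList[j]? = some '1' then (1 : Int) else 0) + pvColOnes rows j := by
      simp [pvColOnes_sum]
    rw [hsum, pvEnum_countP]
    cases h : counts[j]? with
    | none => simp
    | some v =>
      simp only [Option.map_some]
      congr 1
      simp only [Nat.sub_zero, Nat.zero_le, true_and]
      ring

theorem pvComplFold (n : Nat) (b : Nat → Int) :
    (List.range n).foldl (fun a i => a * 2 + (1 - b i)) 0 =
      2 ^ n - 1 - (List.range n).foldl (fun a i => a * 2 + b i) 0 := by
  induction n with
  | zero => simp
  | succ m ih =>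
    rw [List.range_succ, List.foldl_append, List.foldl_append, List.foldl_cons,
      List.foldl_cons, List.foldl_nil, List.foldl_nil, ih, pow_succ]
    ring

theorem pvOnes_getD (rows : List String) (n i : Nat) (hi : i < n) :
    ((rows.foldl (fun cnts row => (pvEnum 0 row.toList).foldl pvRowStep cnts)
        (List.replicate n (0 : Int))).getD i 0) = pvColOnes rows i := by
  have h := pvFoldRows_get? rows (List.replicate n (0 : Int)) i
  rw [List.getD_eq_getElem?_getD, h, List.getElem?_replicate, if_pos hi]
  simp

-- ===== VERDICT (by name: the statement is the Claim_ definition above) =====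
theorem calculate_power_consumption_spec : Claim_equal_calculate_power_consumption := by
  unfold Claim_equal_calculate_power_consumption
  intro report _ _
  unfold Spec_calculate_power_consumption calculate_power_consumption calculate_power_consumption_alt
  cases report with
  | nil => rfl
  | cons r0 rest =>
    simp only
    set rows := r0 :: rest with hrows
    set n := r0.toList.length with hn
    set total : Int := (rows.length : Int) with htotal
    set ones := rows.foldl (fun cnts row => (pvEnum 0 row.toList).foldl pvRowStep cnts)
      (List.replicate n (0 : Int)) with hones
    set b : Nat → Int := fun i => if 2 * pvColOnes rows i > total then (1 : Int) else 0 with hb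
    have hgamma : pvBinToInt ((List.range n).map
        (fun i => if 2 * ones.getD i 0 > total then '1' else '0')) =
        (List.range n).foldl (fun a i => a * 2 + b i) 0 := by
      unfold pvBinToInt
      rw [List.foldl_map]
      apply PySem.List.foldl_congr_mem
      intro a i hi
      have hi' : i < n := List.mem_range.mp hi
      rw [hones, pvOnes_getD rows n i hi', hb]
      by_cases h : 2 * pvColOnes rows i > total <;> simp [h]
    have heps : pvBinToInt ((List.range n).map
        (fun i => if 2 * ones.getD i 0 > total then '0' else '1')) =
        (List.range n).foldl (fun a i => a * 2 + (1 - b i)) 0 := by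
      unfold pvBinToInt
      rw [List.foldl_map]
      apply PySem.List.foldl_congr_mem
      intro a i hi
      have hi' : i < n := List.mem_range.mp hi
      rw [hones, pvOnes_getD rows n i hi', hb]
      by_cases h : 2 * pvColOnes rows i > total <;> simp [h]
    rw [hgamma, heps, pvComplFold n b]
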